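-- pv_equiv track=rewrite | github.com/lixelv/memory | kata/programs/calculator.py | find_deepest_expr
-- ===== SOURCE A (Python) =====
-- def find_deepest_expr(expr):
--     stack = []
--     max_depth = 0
--     deepest_expr = ""
--
--     for i, char in enumerate(expr):
--         if char == "(":
--             stack.append(i)
--         elif char == ")":
--             if stack:
--                 start = stack.pop()
--                 depth = len(stack)
--
--                 if depth > max_depth:
--                     max_depth = depth
--                     deepest_expr = expr[start:i+1]
--
--     while deepest_expr.startswith("(") and deepest_expr.endswith(")"):
--         deepest_expr = deepest_expr[1:-1]
--
--     if deepest_expr and not (deepest_expr.startswith("(") and deepest_expr.endswith(")")):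
--         deepest_expr = "(" + deepest_expr + ")"
--
--     return deepest_expr if deepest_expr else expr
-- ===== SOURCE B (Python) =====
-- def find_deepest_expr(expr):
--     # Pass 1: running counter only -- deepest enclosing depth reached by any matched pair.
--     depth = 0
--     maxd = 0
--     for ch in expr:
--         if ch == "(":
--             depth += 1
--         elif ch == ")":
--             if depth > 0:
--                 depth -= 1
--                 if depth > maxd:
--                     maxd = depth
--     if maxd == 0:
--         return expr
--     # Pass 2: stop at the first ')' whose pair sits at that deepest level.
--     stack = []
--     for i, ch in enumerate(expr):
--         if ch == "(":
--             stack.append(i)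
--         elif ch == ")" and stack:
--             start = stack.pop()
--             if len(stack) == maxd:
--                 s = expr[start:i + 1]
--                 # peel matched outer '('...')' layers in one step
--                 k = 0
--                 while s[k] == "(" and s[len(s) - 1 - k] == ")":
--                     k += 1
--                 core = s[k:len(s) - k]
--                 return "(" + core + ")" if core else expr
--     return expr
-- ===== Notes on version B (the rewrite author's own statement) =====
-- stated objective: alternative
-- what changed: A's single stack-scan that tracks a running maximum and its slice is replaced by a counter-only depth pass plus a second pass that early-returns at the first deepest pair, and A's repeated strip-while loop is replaced by a single peel-count with one slice.
import Mathlib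
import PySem

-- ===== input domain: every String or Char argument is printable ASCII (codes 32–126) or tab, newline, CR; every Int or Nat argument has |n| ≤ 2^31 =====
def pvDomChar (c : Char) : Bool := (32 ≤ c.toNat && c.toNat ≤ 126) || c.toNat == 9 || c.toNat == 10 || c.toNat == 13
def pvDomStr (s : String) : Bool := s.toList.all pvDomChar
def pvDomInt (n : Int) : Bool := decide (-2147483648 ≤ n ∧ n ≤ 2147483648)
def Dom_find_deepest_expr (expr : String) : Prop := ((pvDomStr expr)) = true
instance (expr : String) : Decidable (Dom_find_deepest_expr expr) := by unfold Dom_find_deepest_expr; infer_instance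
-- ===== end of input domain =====

-- B replaces A's single max-tracking scan by a counter-only depth pass plus a second pass that
-- stops at the first deepest pair, and replaces A's strip-while loop by one peel count; objective:
-- alternative decomposition, same O(n) cost.

-- ===== PORT A =====
-- loop body of A: state = (stack of '(' indices, top at head; max_depth; deepest_expr as char list)
def pvStepA (cs : List Char) (acc : List Int × Nat × List Char) (p : Int × Char) :
    List Int × Nat × List Char :=
  if p.2 = '(' then (p.1 :: acc.1, acc.2.1, acc.2.2)
  else if p.2 = ')' then
    match acc.1 with
    | [] => acc
    | start :: rest =>
      if rest.length > acc.2.1 then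
        (rest, rest.length, PySem.List.slice cs (some start) (some (p.1 + 1)))  -- expr[start:i+1]
      else (rest, acc.2.1, acc.2.2)
  else acc

-- A's while loop; startswith("(")/endswith(")") on a 1-char pattern are exactly the head?/getLast?
-- tests, and deepest_expr[1:-1] on a string with that head and last (so length ≥ 2) is exactly
-- (drop 1).dropLast — both noted here because they are ported by hand
def pvStripA (s : List Char) : List Char :=
  if h : s.head? = some '(' ∧ s.getLast? = some ')' then
    pvStripA ((s.drop 1).dropLast)
  else s
termination_by s.length
decreasing_by
  have : s ≠ [] := by intro hnil; rw [hnil] at h; simp at h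
  have : 0 < s.length := List.length_pos_iff.mpr this
  simp [List.length_dropLast]; omega

-- A's code after the loop: strip, rewrap, final return
def pvTailA (expr : String) (d0 : List Char) : String :=
  let d1 := pvStripA d0
  let d2 := if d1 ≠ [] ∧ ¬(d1.head? = some '(' ∧ d1.getLast? = some ')')
            then '(' :: (d1 ++ [')']) else d1
  if d2 ≠ [] then String.ofList d2 else expr

def find_deepest_expr (expr : String) : String :=
  let cs := expr.toList
  pvTailA expr ((List.foldl (pvStepA cs) ([], 0, []) (PySem.List.enumerate cs)).2.2)

-- ===== PORT B =====
-- pass 1 body: state = (running depth, max enclosing depth seen)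
def pvStepB (acc : Nat × Nat) (ch : Char) : Nat × Nat :=
  if ch = '(' then (acc.1 + 1, acc.2)
  else if ch = ')' then
    if acc.1 > 0 then
      let d := acc.1 - 1
      (d, if d > acc.2 then d else acc.2)
    else acc
  else acc

-- B's peel loop: k += 1 while s[k] == '(' and s[len(s)-1-k] == ')'
def pvPeel (s : List Char) (k : Nat) : Nat :=
  if h : s[k]? = some '(' ∧ s[s.length - 1 - k]? = some ')' then pvPeel s (k + 1) else k
termination_by s.length - k
decreasing_by
  have : k < s.length := (List.getElem?_eq_some_iff.mp h.1).1
  omega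

-- B's early-return body: peel, slice the core, wrap or fall back to expr
def pvFinishB (expr : String) (s : List Char) : String :=
  let k := pvPeel s 0
  let core := PySem.List.slice s (some (k : Nat)) (some ((s.length - k : Nat) : Int))  -- s[k:len(s)-k]
  if core ≠ [] then String.ofList ('(' :: (core ++ [')'])) else expr

-- pass 2: scan with an index stack, return at the first pair whose enclosing depth is maxd
def pvFindB (expr : String) (cs : List Char) (maxd : Nat) :
    List (Int × Char) → List Int → String
  | [], _ => expr
  | (i, ch) :: rest, stack =>
    if ch = '(' then pvFindB expr cs maxd rest (i :: stack)
    else if ch = ')' then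
      match stack with
      | [] => pvFindB expr cs maxd rest []
      | start :: st =>
        if st.length = maxd then
          pvFinishB expr (PySem.List.slice cs (some start) (some (i + 1)))  -- expr[start:i+1]
        else pvFindB expr cs maxd rest st
    else pvFindB expr cs maxd rest stack

def find_deepest_expr_alt (expr : String) : String :=
  let cs := expr.toList
  let maxd := (List.foldl pvStepB (0, 0) cs).2
  if maxd = 0 then expr
  else pvFindB expr cs maxd (PySem.List.enumerate cs) []

-- ===== PRECONDITION & SPEC =====
def Spec_find_deepest_expr (expr : String) (out : String) : Prop := out = find_deepest_expr_alt expr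
instance (expr : String) (out : String) : Decidable (Spec_find_deepest_expr expr out) := by unfold Spec_find_deepest_expr; infer_instance

-- ===== CLAIM (what is proved, stated in full; the proofs are below) =====
def Claim_equal_find_deepest_expr : Prop := ∀ (expr : String), Dom_find_deepest_expr expr → Spec_find_deepest_expr expr (find_deepest_expr expr)

-- ===== LEMMAS AND PROOFS =====

-- one-step evaluation lemmas for A's loop body
theorem pvStepA_open (cs : List Char) (st : List Int) (m : Nat) (d : List Char) (i : Int)
    {ch : Char} (h1 : ch = '(') : pvStepA cs (st, m, d) (i, ch) = (i :: st, m, d) := by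
  simp [pvStepA, h1]
theorem pvStepA_close_nil (cs : List Char) (m : Nat) (d : List Char) (i : Int)
    {ch : Char} (h2 : ch = ')') :
    pvStepA cs ([], m, d) (i, ch) = ([], m, d) := by
  simp [pvStepA, h2]
theorem pvStepA_close_hi (cs : List Char) (s0 : Int) (st1 : List Int) (m : Nat) (d : List Char)
    (i : Int) {ch : Char} (h2 : ch = ')') (h3 : st1.length > m) :
    pvStepA cs (s0 :: st1, m, d) (i, ch) =
      (st1, st1.length, PySem.List.slice cs (some s0) (some (i + 1))) := by
  simp [pvStepA, h2, h3]
theorem pvStepA_close_lo (cs : List Char) (s0 : Int) (st1 : List Int) (m : Nat) (d : List Char)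
    (i : Int) {ch : Char} (h2 : ch = ')') (h3 : ¬ st1.length > m) :
    pvStepA cs (s0 :: st1, m, d) (i, ch) = (st1, m, d) := by
  simp [pvStepA, h2, h3]
theorem pvStepA_other (cs : List Char) (st : List Int) (m : Nat) (d : List Char) (i : Int)
    {ch : Char} (h1 : ch ≠ '(') (h2 : ch ≠ ')') :
    pvStepA cs (st, m, d) (i, ch) = (st, m, d) := by
  simp [pvStepA, h1, h2]

-- A's running max never decreases
theorem pvL2 (cs : List Char) :
    ∀ (l : List (Int × Char)) (st : List Int) (m : Nat) (d : List Char),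
      m ≤ (List.foldl (pvStepA cs) (st, m, d) l).2.1 := by
  intro l
  induction l with
  | nil => intro st m d; simp
  | cons p tl ih =>
    intro st m d
    obtain ⟨i, ch⟩ := p
    simp only [List.foldl_cons]
    by_cases h1 : ch = '('
    · rw [pvStepA_open cs st m d i h1]; exact ih _ _ _
    · by_cases h2 : ch = ')'
      · cases st with
        | nil => rw [pvStepA_close_nil cs m d i h2]; exact ih _ _ _
        | cons s0 st1 =>
          by_cases h3 : st1.length > m
          · rw [pvStepA_close_hi cs s0 st1 m d i h2 h3]
            exact le_trans (le_of_lt h3) (ih _ _ _)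
          · rw [pvStepA_close_lo cs s0 st1 m d i h2 h3]; exact ih _ _ _
      · rw [pvStepA_other cs st m d i h1 h2]; exact ih _ _ _

-- if the max does not move, deepest_expr does not move
theorem pvL3 (cs : List Char) :
    ∀ (l : List (Int × Char)) (st : List Int) (m : Nat) (d : List Char),
      (List.foldl (pvStepA cs) (st, m, d) l).2.1 = m →
      (List.foldl (pvStepA cs) (st, m, d) l).2.2 = d := by
  intro l
  induction l with
  | nil => intro st m d _; simp
  | cons p tl ih =>
    intro st m d h
    obtain ⟨i, ch⟩ := p
    simp only [List.foldl_cons] at h ⊢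
    by_cases h1 : ch = '('
    · rw [pvStepA_open cs st m d i h1] at h ⊢; exact ih _ _ _ h
    · by_cases h2 : ch = ')'
      · cases st with
        | nil => rw [pvStepA_close_nil cs m d i h2] at h ⊢; exact ih _ _ _ h
        | cons s0 st1 =>
          by_cases h3 : st1.length > m
          · exfalso
            rw [pvStepA_close_hi cs s0 st1 m d i h2 h3] at h
            have hm := pvL2 cs tl st1 st1.length (PySem.List.slice cs (some s0) (some (i + 1)))
            omega
          · rw [pvStepA_close_lo cs s0 st1 m d i h2 h3] at h ⊢; exact ih _ _ _ h
      · rw [pvStepA_other cs st m d i h1 h2] at h ⊢; exact ih _ _ _ h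

-- B's pass 1 tracks exactly A's (stack length, max_depth)
theorem pvL1 (cs : List Char) :
    ∀ (l : List (Int × Char)) (st : List Int) (m : Nat) (d : List Char),
      List.foldl pvStepB (st.length, m) (l.map (·.2)) =
        ((List.foldl (pvStepA cs) (st, m, d) l).1.length,
         (List.foldl (pvStepA cs) (st, m, d) l).2.1) := by
  intro l
  induction l with
  | nil => intro st m d; simp
  | cons p tl ih =>
    intro st m d
    obtain ⟨i, ch⟩ := p
    simp only [List.map_cons, List.foldl_cons]
    by_cases h1 : ch = '('
    · rw [pvStepA_open cs st m d i h1]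
      have : pvStepB (st.length, m) ch = ((i :: st).length, m) := by simp [pvStepB, h1]
      rw [this]; exact ih _ _ _
    · by_cases h2 : ch = ')'
      · cases st with
        | nil =>
          rw [pvStepA_close_nil cs m d i h2]
          have : pvStepB (List.length ([] : List Int), m) ch = (List.length ([] : List Int), m) := by
            simp [pvStepB, h1, h2]
          rw [this]; exact ih _ _ _
        | cons s0 st1 =>
          by_cases h3 : st1.length > m
          · rw [pvStepA_close_hi cs s0 st1 m d i h2 h3]
            have : pvStepB ((s0 :: st1).length, m) ch = (st1.length, st1.length) := by
              simp [pvStepB, h1, h2, h3]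
            rw [this]; exact ih _ _ _
          · rw [pvStepA_close_lo cs s0 st1 m d i h2 h3]
            have : pvStepB ((s0 :: st1).length, m) ch = (st1.length, m) := by
              simp [pvStepB, h1, h2]; omega
            rw [this]; exact ih _ _ _
      · rw [pvStepA_other cs st m d i h1 h2]
        have : pvStepB (st.length, m) ch = (st.length, m) := by simp [pvStepB, h1, h2]
        rw [this]; exact ih _ _ _

-- one-step evaluation lemmas for B's pass 2
theorem pvFindB_open (expr : String) (cs : List Char) (maxd : Nat) (i : Int) {ch : Char}
    (rest : List (Int × Char)) (stack : List Int) (h1 : ch = '(') :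
    pvFindB expr cs maxd ((i, ch) :: rest) stack = pvFindB expr cs maxd rest (i :: stack) := by
  simp [pvFindB, h1]
theorem pvFindB_close_nil (expr : String) (cs : List Char) (maxd : Nat) (i : Int) {ch : Char}
    (rest : List (Int × Char)) (h1 : ch ≠ '(') (h2 : ch = ')') :
    pvFindB expr cs maxd ((i, ch) :: rest) [] = pvFindB expr cs maxd rest [] := by
  simp [pvFindB, h1, h2]
theorem pvFindB_close_hit (expr : String) (cs : List Char) (maxd : Nat) (i : Int) {ch : Char}
    (rest : List (Int × Char)) (s0 : Int) (st1 : List Int) (h1 : ch ≠ '(') (h2 : ch = ')')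
    (h3 : st1.length = maxd) :
    pvFindB expr cs maxd ((i, ch) :: rest) (s0 :: st1) =
      pvFinishB expr (PySem.List.slice cs (some s0) (some (i + 1))) := by
  simp [pvFindB, h1, h2, h3]
theorem pvFindB_close_miss (expr : String) (cs : List Char) (maxd : Nat) (i : Int) {ch : Char}
    (rest : List (Int × Char)) (s0 : Int) (st1 : List Int) (h1 : ch ≠ '(') (h2 : ch = ')')
    (h3 : st1.length ≠ maxd) :
    pvFindB expr cs maxd ((i, ch) :: rest) (s0 :: st1) = pvFindB expr cs maxd rest st1 := by
  simp [pvFindB, h1, h2, h3]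
theorem pvFindB_other (expr : String) (cs : List Char) (maxd : Nat) (i : Int) {ch : Char}
    (rest : List (Int × Char)) (stack : List Int) (h1 : ch ≠ '(') (h2 : ch ≠ ')') :
    pvFindB expr cs maxd ((i, ch) :: rest) stack = pvFindB expr cs maxd rest stack := by
  simp [pvFindB, h1, h2]

-- main scan lemma: from any state whose max strictly grows, B's pass 2 returns pvFinishB of
-- A's final deepest slice
theorem pvL4 (expr : String) (cs : List Char) :
    ∀ (l : List (Int × Char)) (st : List Int) (m : Nat) (d : List Char),
      m < (List.foldl (pvStepA cs) (st, m, d) l).2.1 →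
      pvFindB expr cs (List.foldl (pvStepA cs) (st, m, d) l).2.1 l st =
        pvFinishB expr (List.foldl (pvStepA cs) (st, m, d) l).2.2 := by
  intro l
  induction l with
  | nil => intro st m d h; simp at h
  | cons p tl ih =>
    intro st m d h
    obtain ⟨i, ch⟩ := p
    simp only [List.foldl_cons] at h ⊢
    by_cases h1 : ch = '('
    · rw [pvStepA_open cs st m d i h1] at h ⊢
      rw [pvFindB_open expr cs _ i tl st h1]
      exact ih _ _ _ h
    · by_cases h2 : ch = ')'
      · cases st with
        | nil =>
          rw [pvStepA_close_nil cs m d i h2] at h ⊢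
          rw [pvFindB_close_nil expr cs _ i tl h1 h2]
          exact ih _ _ _ h
        | cons s0 st1 =>
          by_cases h3 : st1.length > m
          · rw [pvStepA_close_hi cs s0 st1 m d i h2 h3] at h ⊢
            set sl := PySem.List.slice cs (some s0) (some (i + 1)) with hsl
            by_cases h4 :
                st1.length = (List.foldl (pvStepA cs) (st1, st1.length, sl) tl).2.1
            · rw [pvFindB_close_hit expr cs _ i tl s0 st1 h1 h2 h4]
              rw [pvL3 cs tl st1 st1.length sl h4.symm]
            · have hle := pvL2 cs tl st1 st1.length sl
              have hlt : st1.length < (List.foldl (pvStepA cs) (st1, st1.length, sl) tl).2.1 := by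
                omega
              rw [pvFindB_close_miss expr cs _ i tl s0 st1 h1 h2 h4]
              exact ih _ _ _ hlt
          · rw [pvStepA_close_lo cs s0 st1 m d i h2 h3] at h ⊢
            have h4 : st1.length ≠ (List.foldl (pvStepA cs) (st1, m, d) tl).2.1 := by omega
            rw [pvFindB_close_miss expr cs _ i tl s0 st1 h1 h2 h4]
            exact ih _ _ _ h
      · rw [pvStepA_other cs st m d i h1 h2] at h ⊢
        rw [pvFindB_other expr cs _ i tl st h1 h2]
        exact ih _ _ _ h

-- a list with head '(' and last ')' splits as '(' :: mid ++ [')']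
theorem pvSplit (s : List Char) (h : s.head? = some '(' ∧ s.getLast? = some ')') :
    s = '(' :: ((s.drop 1).dropLast ++ [')']) := by
  obtain ⟨h1, h2⟩ := h
  cases s with
  | nil => simp at h1
  | cons a t =>
    simp at h1
    subst h1
    cases t using List.reverseRecOn with
    | nil => simp at h2
    | append_singleton t' b =>
      have hb : b = ')' := by
        have h3 : (('(' :: t') ++ [b]).getLast? = some ')' := by rw [List.cons_append]; exact h2
        rw [List.getLast?_concat] at h3
        exact Option.some_inj.mp h3
      subst hb
      simp

-- peel recurrence: one matched outer layer adds one to the peel count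
theorem pvL5 (mid : List Char) :
    ∀ k, pvPeel ('(' :: (mid ++ [')'])) (k + 1) = pvPeel mid k + 1 := by
  intro k
  induction hk : mid.length - k using Nat.strong_induction_on generalizing k with
  | _ n ih =>
    have hcond : (('(' :: (mid ++ [')']))[k+1]? = some '(' ∧
        (('(' :: (mid ++ [')'])))[('(' :: (mid ++ [')'])).length - 1 - (k+1)]? = some ')') ↔
        (mid[k]? = some '(' ∧ mid[mid.length - 1 - k]? = some ')') := by
      constructor
      · rintro ⟨c1, c2⟩
        have hk1 : k < mid.length := by
          by_contra hge
          have hge' : mid.length ≤ k := Nat.le_of_not_lt hge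
          rcases Nat.lt_or_ge k (mid.length+1) with hlt | hge2
          · have hkeq : k = mid.length := by omega
            subst hkeq
            rw [List.getElem?_cons_succ, List.getElem?_append_right (le_refl _)] at c1
            simp at c1
          · have : ('(' :: (mid ++ [')'])).length ≤ k + 1 := by simp; omega
            rw [List.getElem?_eq_none this] at c1
            simp at c1
        refine ⟨?_, ?_⟩
        · rw [List.getElem?_cons_succ, List.getElem?_append_left hk1] at c1
          exact c1
        · have hlen : ('(' :: (mid ++ [')'])).length - 1 - (k+1) = mid.length - k := by
            simp only [List.length_cons, List.length_append, List.length_nil]; omega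
          rw [hlen] at c2
          have : mid.length - k = (mid.length - 1 - k) + 1 := by omega
          rw [this, List.getElem?_cons_succ, List.getElem?_append_left (by omega)] at c2
          exact c2
      · rintro ⟨c1, c2⟩
        have hk1 : k < mid.length := (List.getElem?_eq_some_iff.mp c1).1
        refine ⟨?_, ?_⟩
        · rw [List.getElem?_cons_succ, List.getElem?_append_left hk1]; exact c1
        · have hlen : ('(' :: (mid ++ [')'])).length - 1 - (k+1) = mid.length - k := by
            simp only [List.length_cons, List.length_append, List.length_nil]; omega
          rw [hlen]
          have : mid.length - k = (mid.length - 1 - k) + 1 := by omega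
          rw [this, List.getElem?_cons_succ, List.getElem?_append_left (by omega)]
          exact c2
    by_cases hc : mid[k]? = some '(' ∧ mid[mid.length - 1 - k]? = some ')'
    · conv_lhs => rw [pvPeel]
      rw [dif_pos (hcond.mpr hc)]
      conv_rhs => rw [pvPeel]
      rw [dif_pos hc]
      subst hk
      exact ih (mid.length - (k+1)) (by
        have hk1 : k < mid.length := (List.getElem?_eq_some_iff.mp hc.1).1
        omega) (k+1) rfl
    · conv_lhs => rw [pvPeel]
      rw [dif_neg (fun hx => hc (hcond.mp hx))]
      conv_rhs => rw [pvPeel]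
      rw [dif_neg hc]

theorem pvPeel_zero_step (mid : List Char) :
    pvPeel ('(' :: (mid ++ [')'])) 0 = pvPeel mid 0 + 1 := by
  rw [pvPeel, dif_pos ?_]
  · exact pvL5 mid 0
  · refine ⟨by simp, ?_⟩
    have hlen : ('(' :: (mid ++ [')'])).length - 1 - 0 = mid.length + 1 := by
      simp only [List.length_cons, List.length_append, List.length_nil]; omega
    rw [hlen]
    rw [List.getElem?_cons_succ, List.getElem?_append_right (le_refl _)]
    simp

-- A's strip loop computes the peel-slice
theorem pvL6 (s : List Char) :
    pvStripA s = (s.drop (pvPeel s 0)).take (s.length - pvPeel s 0 - pvPeel s 0) := by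
  induction hn : s.length using Nat.strong_induction_on generalizing s with
  | _ n ih =>
    by_cases h : s.head? = some '(' ∧ s.getLast? = some ')'
    · obtain ⟨mid, hsplit⟩ : ∃ mid, s = '(' :: (mid ++ [')']) := ⟨_, pvSplit s h⟩
      subst hsplit
      rw [pvStripA, dif_pos h]
      have hmid : ((('(' :: (mid ++ [')'])).drop 1).dropLast) = mid := by simp
      rw [hmid]
      have hn2 : n = mid.length + 2 := by
        simp only [List.length_cons, List.length_append, List.length_nil] at hn
        omega
      subst hn2
      rw [ih mid.length (by omega) mid rfl, pvPeel_zero_step]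
      set p := pvPeel mid 0 with hp
      have hdrop : ('(' :: (mid ++ [')'])).drop (p + 1) = (mid ++ [')']).drop p := by simp
      rw [hdrop]
      by_cases hple : p ≤ mid.length
      · rw [List.drop_append_of_le_length hple,
            List.take_append_of_le_length (by simp [List.length_drop]; omega)]
        congr 1
        omega
      · have h1 : (mid ++ [')']).length ≤ p := by simp; omega
        rw [List.drop_eq_nil_of_le h1, List.drop_eq_nil_of_le (by omega)]
        simp
    · rw [pvStripA, dif_neg h]
      have hz : pvPeel s 0 = 0 := by
        rw [pvPeel, dif_neg]
        intro hx
        obtain ⟨c1, c2⟩ := hx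
        exact h ⟨by rw [List.head?_eq_getElem?]; simpa using c1,
                 by rw [List.getLast?_eq_getElem?]; simpa using c2⟩
      simp [hz, ← hn]

-- the strip loop stops exactly when the guard fails
theorem pvL7 (s : List Char) :
    ¬((pvStripA s).head? = some '(' ∧ (pvStripA s).getLast? = some ')') := by
  induction hn : s.length using Nat.strong_induction_on generalizing s with
  | _ n ih =>
    by_cases h : s.head? = some '(' ∧ s.getLast? = some ')'
    · rw [pvStripA, dif_pos h]
      have hne : s ≠ [] := by intro hnil; rw [hnil] at h; simp at h
      have hpos : 0 < s.length := List.length_pos_iff.mpr hne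
      exact ih ((s.drop 1).dropLast).length
        (by simp [List.length_dropLast]; omega) _ rfl
    · rw [pvStripA, dif_neg h]; exact h

-- A's post-loop code equals B's early-return body
theorem pvL8 (expr : String) (s : List Char) : pvTailA expr s = pvFinishB expr s := by
  have h7 := pvL7 s
  rw [pvL6 s] at h7
  simp only [pvTailA, pvFinishB, PySem.List.slice_natCast, pvL6 s]
  by_cases hc : (s.drop (pvPeel s 0)).take (s.length - pvPeel s 0 - pvPeel s 0) = []
  · simp [hc]
  · simp only [ne_eq, hc, not_false_eq_true, h7, and_self, if_true, true_and]
    simp [hc]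

-- ===== VERDICT (by name: the statement is the Claim_ definition above) =====
theorem find_deepest_expr_spec : Claim_equal_find_deepest_expr := by
  intro expr _
  unfold Spec_find_deepest_expr find_deepest_expr find_deepest_expr_alt
  simp only []
  set cs := expr.toList with hcs
  have hC := pvL1 cs (PySem.List.enumerate cs) [] 0 []
  rw [PySem.List.map_snd_enumerate] at hC
  set r := List.foldl (pvStepA cs) (([] : List Int), 0, ([] : List Char))
      (PySem.List.enumerate cs) with hr
  by_cases hM : r.2.1 = 0
  · have hd : r.2.2 = [] := pvL3 cs (PySem.List.enumerate cs) [] 0 [] hM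
    rw [hd]
    have hB : (List.foldl pvStepB ((0 : Nat), (0 : Nat)) cs).2 = 0 := by
      rw [show ((0 : Nat), (0 : Nat)) = ((List.length ([] : List Int)), (0 : Nat)) by simp, hC, hM]
    rw [hB]
    simp [pvTailA, pvStripA]
  · have hlt : 0 < r.2.1 := Nat.pos_of_ne_zero hM
    have hB : (List.foldl pvStepB ((0 : Nat), (0 : Nat)) cs).2 = r.2.1 := by
      rw [show ((0 : Nat), (0 : Nat)) = ((List.length ([] : List Int)), (0 : Nat)) by simp, hC]
    rw [hB, if_neg hM]
    rw [pvL4 expr cs (PySem.List.enumerate cs) [] 0 [] hlt]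
    exact pvL8 expr r.2.2
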